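-- pv_equiv track=rewrite | github.com/seilk/Algorithm-PS | BAEKJOON/안정적인 문자열.py | solve
-- ===== SOURCE A (Python) =====
-- from collections import deque
--
-- def solve(target) :
-- 	dq = deque(list(target))
-- 	stack = []
-- 	ans = 0
-- 	while dq:
-- 		cur = dq.popleft()
-- 		if cur == "}":
-- 			if not stack :
-- 				ans += 1
-- 				stack.append("{")
-- 				continue
-- 			stack.pop()
--
-- 		else:
-- 			stack.append(cur)
-- 	return ans + len(stack) // 2
-- ===== SOURCE B (Python) =====
-- def solve(target):
--     raw = 0
--     low = 0
--     for ch in target: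
--         raw += -1 if ch == "}" else 1
--         if raw < low:
--             low = raw
--     ans = (-low + 1) // 2
--     return ans + (raw + 2 * ans) // 2
-- ===== Notes on version B (the rewrite author's own statement) =====
-- stated objective: faster
-- what changed: Replaces A's deque+stack flip simulation with a single pass that tracks only the running signed balance and its prefix minimum, then computes the answer by closed-form arithmetic instead of simulating the stack.
import Mathlib
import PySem

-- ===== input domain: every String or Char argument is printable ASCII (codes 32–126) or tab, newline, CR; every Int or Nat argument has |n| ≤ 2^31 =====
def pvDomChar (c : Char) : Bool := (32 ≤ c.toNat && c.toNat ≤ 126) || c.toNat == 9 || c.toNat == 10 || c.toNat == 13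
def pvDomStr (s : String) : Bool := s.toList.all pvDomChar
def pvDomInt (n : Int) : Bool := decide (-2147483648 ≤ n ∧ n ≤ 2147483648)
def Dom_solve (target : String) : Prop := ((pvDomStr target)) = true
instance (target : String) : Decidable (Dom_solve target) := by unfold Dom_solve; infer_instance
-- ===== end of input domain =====

-- B replaces A's stack flip-simulation by prefix-minimum tracking plus a closed arithmetic formula.

-- ===== PORT A =====
-- A's while loop over the deque: state is the stack (list of pushed chars) and ans.
def solveLoop : List Char → List Char → Int → (List Char × Int)
  | [], stack, ans => (stack, ans)
  | cur :: rest, stack, ans =>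
    if cur = '}' then
      match stack with
      | [] => solveLoop rest ['{'] (ans + 1)
      | _ :: tl => solveLoop rest tl ans
    else solveLoop rest (cur :: stack) ans

def solve (target : String) : Int :=
  let (stack, ans) := solveLoop target.toList [] 0
  ans + PySem.Int.floordiv (stack.length : Int) 2

-- ===== PORT B =====
def altLoop : List Char → Int → Int → (Int × Int)
  | [], raw, low => (raw, low)
  | c :: rest, raw, low =>
    let raw' := raw + (if c = '}' then -1 else 1)
    altLoop rest raw' (min low raw')

def solve_alt (target : String) : Int :=
  let (raw, low) := altLoop target.toList 0 0
  let ans := PySem.Int.floordiv (-low + 1) 2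
  ans + PySem.Int.floordiv (raw + 2 * ans) 2

-- ===== PRECONDITION & SPEC =====
def Spec_solve (target : String) (out : Int) : Prop := out = solve_alt target
instance (target : String) (out : Int) : Decidable (Spec_solve target out) := by unfold Spec_solve; infer_instance

-- ===== CLAIM (what is proved, stated in full; the proofs are below) =====
def Claim_equal_solve : Prop := ∀ (target : String), Dom_solve target → Spec_solve target (solve target)

-- ===== LEMMAS AND PROOFS =====

-- Invariant tying A's (stack, ans) to B's (raw, low) after any common prefix.
def StInv (stack : List Char) (ans raw low : Int) : Prop :=
  (stack.length : Int) = raw + 2 * ans ∧ low ≤ raw ∧ low ≤ 0 ∧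
    2 * ans - 1 ≤ -low ∧ -low ≤ 2 * ans

lemma loop_inv (cs : List Char) : ∀ (stack : List Char) (ans raw low : Int),
    StInv stack ans raw low →
    StInv (solveLoop cs stack ans).1 (solveLoop cs stack ans).2
        (altLoop cs raw low).1 (altLoop cs raw low).2 := by
  induction cs with
  | nil => intro stack ans raw low h; simpa [solveLoop, altLoop] using h
  | cons c rest ih =>
    intro stack ans raw low h
    obtain ⟨hlen, hlr, hl0, hlo, hhi⟩ := h
    by_cases hc : c = '}'
    · cases stack with
      | nil =>
        have h0 : raw + 2 * ans = 0 := by simpa using hlen.symm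
        simp only [solveLoop, altLoop, if_pos hc]
        exact ih ['{'] (ans + 1) (raw + -1) (min low (raw + -1))
          ⟨by simp only [List.length_cons, List.length_nil]; omega,
           by omega, by omega, by omega, by omega⟩
      | cons x tl =>
        have hlen' : (tl.length : Int) + 1 = raw + 2 * ans := by
          simpa using hlen
        simp only [solveLoop, altLoop, if_pos hc]
        exact ih tl ans (raw + -1) (min low (raw + -1))
          ⟨by omega, by omega, by omega, by omega, by omega⟩
    · simp only [solveLoop, altLoop, if_neg hc]
      exact ih (c :: stack) ans (raw + 1) (min low (raw + 1))
        ⟨by simp only [List.length_cons]; omega, by omega, by omega, by omega, by omega⟩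

-- ===== VERDICT (by name: the statement is the Claim_ definition above) =====
theorem solve_spec : Claim_equal_solve := by
  intro target _
  unfold Spec_solve solve solve_alt
  have h := loop_inv target.toList [] 0 0 0 ⟨by simp, le_refl _, le_refl _, by omega, by omega⟩
  rcases hA : solveLoop target.toList [] 0 with ⟨st, ansA⟩
  rcases hB : altLoop target.toList 0 0 with ⟨raw, low⟩
  rw [hA, hB] at h
  obtain ⟨hlen, hlr, hl0, hlo, hhi⟩ := h
  have hans : ansA = PySem.Int.floordiv (-low + 1) 2 := by
    rw [PySem.Int.floordiv_eq_ediv_of_pos (by omega)]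
    omega
  show ansA + PySem.Int.floordiv (st.length : Int) 2
      = PySem.Int.floordiv (-low + 1) 2
        + PySem.Int.floordiv (raw + 2 * PySem.Int.floordiv (-low + 1) 2) 2
  rw [hlen, ← hans]
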